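-- pv_equiv track=rewrite | github.com/Oliva96/problem-solving | organizing_containers_of_balls.py | organizingContainers
-- ===== SOURCE A (Python) =====
-- def organizingContainers(container):
--     d = {}
--     n = len(container)
--     for r in range(n):
--         cap = sum([container[r][c] for c in range(n)])
--         if cap in d:
--             d[cap] += 1
--         else:
--             d[cap] = 1
--
--     ans = True
--     for c in range(n):
--         cap = sum([container[r][c] for r in range(n)])
--         if cap in d:
--             d[cap] -= 1
--         else:
--             ans = False
--
--     for v in d.values():
--         if v != 0:
--             ans = False
--
--     return "Possible" if ans else "Impossible"
-- ===== SOURCE B (Python) =====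
-- def organizingContainers(container):
--     n = len(container)
--     rows = sorted(sum(row[:n]) for row in container)
--     cols = sorted(sum(row[c] for row in container) for c in range(n))
--     return "Possible" if rows == cols else "Impossible"
-- ===== Notes on version B (the rewrite author's own statement) =====
-- stated objective: simpler
-- what changed: Replaces A's increment/decrement counting dictionary with three passes of zero-check over its values by computing the row-sum and column-sum lists and comparing them after sorting.
import Mathlib
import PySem

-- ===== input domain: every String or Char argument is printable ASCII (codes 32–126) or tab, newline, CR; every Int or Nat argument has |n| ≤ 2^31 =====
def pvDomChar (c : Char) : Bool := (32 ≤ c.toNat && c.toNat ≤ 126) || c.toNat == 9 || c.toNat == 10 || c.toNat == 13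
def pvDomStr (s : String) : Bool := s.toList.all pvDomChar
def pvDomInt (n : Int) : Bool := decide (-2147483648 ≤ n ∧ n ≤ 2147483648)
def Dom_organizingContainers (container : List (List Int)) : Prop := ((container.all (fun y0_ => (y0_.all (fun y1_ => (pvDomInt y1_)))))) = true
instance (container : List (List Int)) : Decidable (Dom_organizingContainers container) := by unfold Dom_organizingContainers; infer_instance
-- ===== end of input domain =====

-- B replaces A's increment/decrement counting dictionary (plus a final zero-check pass over
-- its values) with a sort-then-compare of the row-sum and column-sum lists; same cost, simpler.

-- ===== PORT A =====
def organizingContainers (container : List (List Int)) : String :=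
  let n : Int := container.length
  let d1 : PySem.Dict Int Int := (PySem.List.pyRange 0 n).foldl (fun d r =>
    let cap := ((PySem.List.pyRange 0 n).map
      (fun c => PySem.List.pyGetD (PySem.List.pyGetD container r []) c 0)).sum
    if d.contains cap then d.modify cap 0 (· + 1) else d.insert cap 1) PySem.Dict.empty
  let p : PySem.Dict Int Int × Bool := (PySem.List.pyRange 0 n).foldl (fun p c =>
    let cap := ((PySem.List.pyRange 0 n).map
      (fun r => PySem.List.pyGetD (PySem.List.pyGetD container r []) c 0)).sum
    if p.1.contains cap then (p.1.modify cap 0 (· - 1), p.2) else (p.1, false)) (d1, true)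
  let ans : Bool := p.1.values.foldl (fun a v => if v ≠ 0 then false else a) p.2
  if ans then "Possible" else "Impossible"

-- ===== PORT B =====
def organizingContainers_alt (container : List (List Int)) : String :=
  let n : Int := container.length
  let rows := PySem.List.sorted (container.map (fun row => (PySem.List.slice row none (some n)).sum)) (fun x => x)
  let cols := PySem.List.sorted ((PySem.List.pyRange 0 n).map
    (fun c => (container.map (fun row => PySem.List.pyGetD row c 0)).sum)) (fun x => x)
  if rows == cols then "Possible" else "Impossible"

-- ===== PRECONDITION & SPEC =====
-- Pre_ excludes exactly the inputs on which A raises IndexError: a row shorter than the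
-- number of rows (A indexes container[r][c] for all r, c < len(container)).
def Pre_organizingContainers (container : List (List Int)) : Prop :=
  ∀ row ∈ container, container.length ≤ row.length
instance (container : List (List Int)) : Decidable (Pre_organizingContainers container) := by
  unfold Pre_organizingContainers; infer_instance

def pvWitness_organizingContainers : List (List Int) := [[1, 2], [3, 4]]

def Spec_organizingContainers (container : List (List Int)) (out : String) : Prop :=
  out = organizingContainers_alt container
instance (container : List (List Int)) (out : String) : Decidable (Spec_organizingContainers container out) := by
  unfold Spec_organizingContainers; infer_instance

-- ===== CLAIM (what is proved, stated in full; the proofs are below) =====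
def Claim_equal_organizingContainers : Prop :=
  ∀ (container : List (List Int)), Dom_organizingContainers container →
    Pre_organizingContainers container →
    Spec_organizingContainers container (organizingContainers container)

-- ===== LEMMAS AND PROOFS =====

-- the row-sum and column-sum lists of the leading n×n block (n = number of rows)
def pvRowSums (container : List (List Int)) : List Int :=
  container.map (fun row => (row.take container.length).sum)

def pvColSums (container : List (List Int)) : List Int :=
  (List.range container.length).map
    (fun c : Nat => (container.map (fun row => PySem.List.pyGetD row (c : Int) 0)).sum)

-- A's first-loop branch is exactly Counter's update step
lemma pv_branch_eq (d : PySem.Dict Int Int) (x : Int) :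
    (if d.contains x then d.modify x 0 (· + 1) else d.insert x 1) = d.modify x 0 (· + 1) := by
  by_cases h : d.contains x
  · simp [PySem.Dict.modify, h]
  · rw [if_neg (by simp [h]), PySem.Dict.modify,
      PySem.Dict.getD_of_not_contains d 0 (by simpa using h), zero_add]

-- invariant of A's second loop: keys and membership never change, each key's value drops by
-- the number of matching column sums that hit an existing key, and the flag records whether
-- every column sum hit a key
lemma pv_loop2 (L : List Int) (d : PySem.Dict Int Int) (b : Bool) :
    (∀ k, (L.foldl (fun p c => if p.1.contains c then (p.1.modify c 0 (· - 1), p.2) else (p.1, false)) (d, b)).1.contains k = d.contains k)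
  ∧ (L.foldl (fun p c => if p.1.contains c then (p.1.modify c 0 (· - 1), p.2) else (p.1, false)) (d, b)).1.keys = d.keys
  ∧ (∀ k, (L.foldl (fun p c => if p.1.contains c then (p.1.modify c 0 (· - 1), p.2) else (p.1, false)) (d, b)).1.getD k 0
        = d.getD k 0 - ((L.filter (fun c => d.contains c)).count k : Int))
  ∧ (L.foldl (fun p c => if p.1.contains c then (p.1.modify c 0 (· - 1), p.2) else (p.1, false)) (d, b)).2
      = (b && L.all (fun c => d.contains c)) := by
  induction L generalizing d b with
  | nil => simp
  | cons c t ih =>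
    rw [List.foldl_cons]
    by_cases h : d.contains c
    · rw [if_pos h]
      obtain ⟨ih1, ih2, ih3, ih4⟩ := ih (d.modify c 0 (· - 1)) b
      have hcont : ∀ k, (d.modify c 0 (· - 1)).contains k = d.contains k := by
        intro k
        rw [PySem.Dict.contains_modify]
        by_cases hk : k = c <;> simp [hk, h]
      refine ⟨fun k => (ih1 k).trans (hcont k), ?_, ?_, ?_⟩
      · rw [ih2, PySem.Dict.keys_modify, PySem.Dict.keys_insert_of_contains _ _ h]
      · intro k
        rw [ih3 k, PySem.Dict.getD_modify]
        have hfil : (c :: t).filter (fun c => d.contains c) = c :: t.filter (fun c => d.contains c) := by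
          rw [List.filter_cons_of_pos h]
        rw [hfil, List.count_cons]
        have hfil2 : t.filter (fun x => (d.modify c 0 (· - 1)).contains x) = t.filter (fun x => d.contains x) := by
          apply List.filter_congr; intro x _; rw [hcont x]
        rw [hfil2]
        by_cases hk : k = c
        · simp only [hk, beq_self_eq_true, if_true]
          push_cast; ring
        · rw [if_neg hk]
          have hck : (c == k) = false := by simp [Ne.symm hk]
          rw [hck]; simp
      · rw [ih4, List.all_cons, h]
        rw [show (fun x => (d.modify c 0 (· - 1)).contains x) = (fun x => d.contains x) from funext hcont]
        simp
    · rw [if_neg (by simpa using h)]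
      obtain ⟨ih1, ih2, ih3, ih4⟩ := ih d false
      refine ⟨ih1, ih2, ?_, ?_⟩
      · intro k
        rw [ih3 k, List.filter_cons_of_neg (by simpa using h)]
      · rw [ih4, List.all_cons]
        simp [h]

-- final pass over the values: false as soon as some value is nonzero
lemma pv_loop3 (l : List Int) (b : Bool) :
    l.foldl (fun a v => if v ≠ 0 then false else a) b = (b && l.all (fun v => v == 0)) := by
  induction l generalizing b with
  | nil => simp
  | cons v t ih =>
    rw [List.foldl_cons, ih]
    by_cases h : v = 0 <;> simp [h]

-- the multiset fact behind the counter check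
lemma pv_check_iff (R C : List Int)
    (h1 : ∀ c ∈ C, c ∈ R)
    (h2 : ∀ k ∈ R, (R.count k : Int) - (C.count k : Int) = 0) : C.Perm R := by
  rw [List.perm_iff_count]
  intro a
  by_cases ha : a ∈ R
  · have := h2 a ha; omega
  · rw [List.count_eq_zero_of_not_mem ha, List.count_eq_zero]
    intro hc; exact ha (h1 a hc)

-- reading a list elementwise over range of its length is the list itself
lemma pv_map_range_getD {α β : Type} (l : List α) (f : α → β) (d : α) :
    (List.range l.length).map (fun j => f (l.getD j d)) = l.map f := by
  induction l with
  | nil => simp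
  | cons x t ih =>
    rw [List.length_cons, List.range_succ_eq_map, List.map_cons, List.map_map]
    simp only [List.getD_cons_zero, Function.comp_def, Nat.succ_eq_add_one, List.getD_cons_succ]
    rw [ih, List.map_cons]

-- a prefix read through pyGetD over range n is take n
lemma pv_range_getD_take (l : List Int) (n : Nat) (h : n ≤ l.length) (d : Int) :
    (List.range n).map (fun j => l.getD j d) = l.take n := by
  apply List.ext_getElem
  · simp [h]
  · intro i h1 h2
    simp only [List.getElem_map, List.getElem_range, List.getElem_take]
    rw [List.getD_eq_getElem l d (by simp at h1; omega)]

-- A's row-cap list is pvRowSums …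
lemma pv_listR (container : List (List Int)) (hpre : Pre_organizingContainers container) :
    (PySem.List.pyRange 0 (container.length : Int)).map (fun r =>
      ((PySem.List.pyRange 0 (container.length : Int)).map
        (fun c => PySem.List.pyGetD (PySem.List.pyGetD container r []) c 0)).sum)
      = pvRowSums container := by
  rw [show pvRowSums container
      = (List.range container.length).map (fun j => ((container.getD j []).take container.length).sum) from
    (pv_map_range_getD container (fun row => (row.take container.length).sum) []).symm]
  nth_rewrite 1 [PySem.List.pyRange_zero_natCast]
  rw [PySem.List.pyRange_zero_natCast, List.map_map]
  apply List.map_congr_left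
  intro k hk
  simp only [Function.comp_def, PySem.List.pyGetD_natCast]
  have hk' : k < container.length := List.mem_range.mp hk
  have hmem : container.getD k [] ∈ container := by
    rw [List.getD_eq_getElem _ _ hk']; exact List.getElem_mem _
  rw [List.map_map]
  simp only [Function.comp_def, PySem.List.pyGetD_natCast]
  rw [pv_range_getD_take (container.getD k []) container.length (hpre _ hmem) 0]

-- … and its col-cap list is pvColSums
lemma pv_listC (container : List (List Int)) :
    (PySem.List.pyRange 0 (container.length : Int)).map (fun c =>
      ((PySem.List.pyRange 0 (container.length : Int)).map
        (fun r => PySem.List.pyGetD (PySem.List.pyGetD container r []) c 0)).sum)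
      = pvColSums container := by
  simp only [pvColSums, PySem.List.pyRange_zero_natCast, List.map_map, Function.comp_def]
  apply List.map_congr_left
  intro k _
  simp only [PySem.List.pyGetD_natCast]
  exact congrArg List.sum (pv_map_range_getD container (fun row => row.getD k 0) [])

-- A's counter check, run from Counter R over the column sums C, succeeds iff C and R agree
-- as multisets
lemma pv_ans_iff (R C : List Int) :
    ((C.foldl (fun p c => if p.1.contains c then (p.1.modify c 0 (· - 1), p.2) else (p.1, false))
        (PySem.Dict.counter R, true)).1.values.foldl (fun a v => if v ≠ 0 then false else a)
      (C.foldl (fun p c => if p.1.contains c then (p.1.modify c 0 (· - 1), p.2) else (p.1, false))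
        (PySem.Dict.counter R, true)).2 = true) ↔ C.Perm R := by
  obtain ⟨_, h2, h3, h4⟩ := pv_loop2 C (PySem.Dict.counter R) true
  have hnd : (C.foldl (fun p c => if p.1.contains c then (p.1.modify c 0 (· - 1), p.2) else (p.1, false))
      (PySem.Dict.counter R, true)).1.keys.Nodup := by
    rw [h2]; exact PySem.Dict.nodup_keys_counter R
  rw [pv_loop3, h4, PySem.Dict.values_eq_map_keys _ hnd 0, h2, PySem.Dict.keys_counter]
  simp only [Bool.true_and, Bool.and_eq_true, List.all_eq_true, List.forall_mem_map,
    beq_iff_eq, PySem.Dict.contains_counter, List.contains_iff_mem,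
    PySem.Set.mem_ofList]
  constructor
  · rintro ⟨ha, hz⟩
    have hfilC : C.filter (fun c => (PySem.Dict.counter R).contains c) = C := by
      rw [List.filter_eq_self]
      intro c hc
      simp [PySem.Dict.contains_counter, ha c hc]
    apply pv_check_iff R C ha
    intro k hk
    have hv := hz k hk
    rw [h3 k, PySem.Dict.getD_counter, hfilC] at hv
    exact hv
  · intro hp
    have ha : ∀ c ∈ C, c ∈ R := fun c hc => hp.mem_iff.mp hc
    have hfilC : C.filter (fun c => (PySem.Dict.counter R).contains c) = C := by
      rw [List.filter_eq_self]
      intro c hc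
      simp [PySem.Dict.contains_counter, ha c hc]
    refine ⟨ha, fun k _ => ?_⟩
    rw [h3 k, PySem.Dict.getD_counter, hfilC, List.perm_iff_count.mp hp k]
    ring

-- A computes the multiset comparison of pvColSums against pvRowSums
lemma pv_A_eq (container : List (List Int)) (hpre : Pre_organizingContainers container) :
    organizingContainers container
      = if (pvColSums container).Perm (pvRowSums container) then "Possible" else "Impossible" := by
  simp only [organizingContainers]
  have e1 : (PySem.List.pyRange 0 (container.length : Int)).foldl (fun d r =>
      if d.contains ((PySem.List.pyRange 0 (container.length : Int)).map
          (fun c => PySem.List.pyGetD (PySem.List.pyGetD container r []) c 0)).sum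
      then d.modify ((PySem.List.pyRange 0 (container.length : Int)).map
          (fun c => PySem.List.pyGetD (PySem.List.pyGetD container r []) c 0)).sum 0 (· + 1)
      else d.insert ((PySem.List.pyRange 0 (container.length : Int)).map
          (fun c => PySem.List.pyGetD (PySem.List.pyGetD container r []) c 0)).sum 1)
      PySem.Dict.empty = PySem.Dict.counter (pvRowSums container) := by
    rw [← pv_listR container hpre, PySem.Dict.counter_eq_foldl, List.foldl_map]
    congr 1
    funext d r
    exact pv_branch_eq d _
  have e2 : (PySem.List.pyRange 0 (container.length : Int)).foldl (fun (p : PySem.Dict Int Int × Bool) c =>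
      if p.1.contains ((PySem.List.pyRange 0 (container.length : Int)).map
          (fun r => PySem.List.pyGetD (PySem.List.pyGetD container r []) c 0)).sum
      then (p.1.modify ((PySem.List.pyRange 0 (container.length : Int)).map
          (fun r => PySem.List.pyGetD (PySem.List.pyGetD container r []) c 0)).sum 0 (· - 1), p.2)
      else (p.1, false)) (PySem.Dict.counter (pvRowSums container), true)
      = (pvColSums container).foldl
          (fun p c => if p.1.contains c then (p.1.modify c 0 (· - 1), p.2) else (p.1, false))
          (PySem.Dict.counter (pvRowSums container), true) := by
    rw [← pv_listC container, List.foldl_map]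
  rw [e1, e2]
  by_cases hp : (pvColSums container).Perm (pvRowSums container)
  · rw [if_pos ((pv_ans_iff (pvRowSums container) (pvColSums container)).mpr hp), if_pos hp]
  · rw [if_neg (fun h => hp ((pv_ans_iff (pvRowSums container) (pvColSums container)).mp h)),
      if_neg hp]

-- B computes the same comparison by sorting
lemma pv_B_eq (container : List (List Int)) :
    organizingContainers_alt container
      = if (pvColSums container).Perm (pvRowSums container) then "Possible" else "Impossible" := by
  simp only [organizingContainers_alt]
  have erows : container.map (fun row => (PySem.List.slice row none (some (container.length : Int))).sum)
      = pvRowSums container := by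
    simp only [PySem.List.slice_to_natCast]; rfl
  have ecols : (PySem.List.pyRange 0 (container.length : Int)).map
      (fun c => (container.map (fun row => PySem.List.pyGetD row c 0)).sum) = pvColSums container := by
    rw [PySem.List.pyRange_zero_natCast, List.map_map]; rfl
  rw [erows, ecols]
  by_cases hp : (pvColSums container).Perm (pvRowSums container)
  · rw [if_pos (by
      rw [beq_iff_eq, PySem.List.sorted_id_eq_sorted_id_iff_perm]
      exact hp.symm), if_pos hp]
  · rw [if_neg (by
      rw [beq_iff_eq, PySem.List.sorted_id_eq_sorted_id_iff_perm]
      exact fun h => hp h.symm), if_neg hp]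

-- ===== VERDICT (by name: the statement is the Claim_ definition above) =====
theorem organizingContainers_spec : Claim_equal_organizingContainers := by
  intro container _hdom hpre
  unfold Spec_organizingContainers
  rw [pv_A_eq container hpre, pv_B_eq container]
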